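-- pv_equiv track=rewrite | github.com/varun369/SuperLocalMemoryV2 | src/superlocalmemory/attribution/watermark.py | _encode_key
-- ===== SOURCE A (Python) =====
-- _BIT_ZERO: str = "\u200b"   # Zero-width space
--
-- _BIT_ONE: str = "\u200c"    # Zero-width non-joiner
--
-- _END_MARKER: str = "\u200d"  # Zero-width joiner
--
-- _START_MARKER: str = "\ufeff"  # Byte-order mark
--
-- def _encode_key(key: str) -> str:
--     """Convert *key* to a framed zero-width character sequence.
--
--     Each character of *key* is converted to 8 binary digits, each
--     digit is mapped to a zero-width char, and the whole thing is
--     wrapped with start/end markers.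
--     """
--     bits: list[str] = []
--     for char in key:
--         byte_val = ord(char)
--         for bit_pos in range(7, -1, -1):
--             if (byte_val >> bit_pos) & 1:
--                 bits.append(_BIT_ONE)
--             else:
--                 bits.append(_BIT_ZERO)
--
--     return _START_MARKER + "".join(bits) + _END_MARKER
-- ===== SOURCE B (Python) =====
-- _BIT_ZERO: str = "\u200b"
-- _BIT_ONE: str = "\u200c"
-- _END_MARKER: str = "\u200d"
-- _START_MARKER: str = "\ufeff"
--
-- _TABLE = str.maketrans({"0": _BIT_ZERO, "1": _BIT_ONE})
--
--
-- def _encode_key(key: str) -> str: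
--     body = "".join(format(ord(c) & 0xFF, "08b").translate(_TABLE) for c in key)
--     return _START_MARKER + body + _END_MARKER
-- ===== Notes on version B (the rewrite author's own statement) =====
-- stated objective: idiomatic
-- what changed: Replaces the explicit per-bit shift-and-mask loop with accumulator list by formatting each byte as an eight-digit binary string and mapping digits through a str.maketrans/translate table built once, joined in a single comprehension.
import Mathlib
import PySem

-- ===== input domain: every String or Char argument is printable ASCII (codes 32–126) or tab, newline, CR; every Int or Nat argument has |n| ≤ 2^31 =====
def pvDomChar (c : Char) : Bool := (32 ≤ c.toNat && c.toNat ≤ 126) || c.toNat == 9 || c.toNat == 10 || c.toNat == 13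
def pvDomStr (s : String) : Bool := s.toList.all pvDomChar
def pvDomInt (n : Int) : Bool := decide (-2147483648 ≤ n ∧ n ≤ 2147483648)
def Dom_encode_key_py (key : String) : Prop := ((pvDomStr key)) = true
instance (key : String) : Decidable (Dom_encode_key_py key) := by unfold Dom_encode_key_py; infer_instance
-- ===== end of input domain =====

-- B replaces A's explicit per-bit shift/mask loop and accumulator by an 8-bit binary formatting
-- helper plus a '0'/'1' → zero-width translation table applied per character (idiomatic decomposition).

def pvBitZero : String := "\u200b"
def pvBitOne : String := "\u200c"
def pvEndMarker : String := "\u200d"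
def pvStartMarker : String := "\ufeff"

-- ===== PORT A =====
-- for char in key: for bit_pos in range(7,-1,-1): bits.append(ONE/ZERO by (byte_val>>bit_pos)&1)
def encode_key_py (key : String) : String :=
  let bits : List String :=
    key.toList.foldl (fun bits char =>
      let byte_val : Nat := char.toNat
      (PySem.List.pyRange 7 (-1) (-1)).foldl (fun bits bit_pos =>
        if (byte_val >>> bit_pos.toNat) &&& 1 = 1 then bits ++ [pvBitOne]
        else bits ++ [pvBitZero]) bits) []
  pvStartMarker ++ PySem.Str.join "" bits ++ pvEndMarker

-- ===== PORT B =====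
-- format(n, '08b') for n < 256: eight binary digit characters, built back-to-front by divmod
def pvBin8Go (n k : Nat) (acc : List Char) : List Char :=
  match k with
  | 0 => acc
  | k + 1 => pvBin8Go (n / 2) k ((if n % 2 = 1 then '1' else '0') :: acc)

def pvBin8 (n : Nat) : List Char :=
  pvBin8Go n 8 []

-- the translation table {'0' ↦ _BIT_ZERO, '1' ↦ _BIT_ONE} applied to one digit
def pvTr (c : Char) : Char := if c = '1' then '\u200c' else '\u200b'

def encode_key_py_alt (key : String) : String :=
  let body := PySem.Str.join "" (key.toList.map (fun c => String.ofList ((pvBin8 (c.toNat &&& 0xFF)).map pvTr)))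
  pvStartMarker ++ body ++ pvEndMarker

-- ===== PRECONDITION & SPEC =====
def Spec_encode_key_py (key : String) (out : String) : Prop := out = encode_key_py_alt key
instance (key : String) (out : String) : Decidable (Spec_encode_key_py key out) := by unfold Spec_encode_key_py; infer_instance

-- ===== CLAIM (what is proved, stated in full; the proofs are below) =====
def Claim_equal_encode_key_py : Prop := ∀ (key : String), Dom_encode_key_py key → Spec_encode_key_py key (encode_key_py key)

-- ===== LEMMAS AND PROOFS =====

-- A's eight-string chunk for one byte value
def pvChunkA (b : Nat) : List String :=
  (PySem.List.pyRange 7 (-1) (-1)).map (fun bit_pos =>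
    if (b >>> bit_pos.toNat) &&& 1 = 1 then pvBitOne else pvBitZero)

def pvChunkA' (c : Char) : List String := pvChunkA c.toNat

theorem pvChunkA_spec (b : Nat) (bits : List String) :
    (PySem.List.pyRange 7 (-1) (-1)).foldl (fun bits bit_pos =>
      if (b >>> bit_pos.toNat) &&& 1 = 1 then bits ++ [pvBitOne]
      else bits ++ [pvBitZero]) bits = bits ++ pvChunkA b := by
  rw [PySem.List.foldl_congr_mem (g := fun bits bit_pos =>
      bits ++ [if (b >>> bit_pos.toNat) &&& 1 = 1 then pvBitOne else pvBitZero])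
    (h := by intro acc x _; dsimp only; split <;> simp_all)]
  exact PySem.List.foldl_append_singleton_eq_map _ _ _

theorem pvPerChar (b : Nat) :
    (pvChunkA b).flatMap String.toList = (pvBin8 (b &&& 0xFF)).map pvTr := by
  have h255 : b &&& 0xFF = b % 256 := Nat.and_two_pow_sub_one_eq_mod b 8
  rw [pvChunkA, show PySem.List.pyRange 7 (-1) (-1) = [7,6,5,4,3,2,1,0] from by decide, h255]
  simp only [List.map_cons, List.map_nil, List.flatMap_cons, List.flatMap_nil,
    pvBin8, pvBin8Go, apply_ite String.toList, apply_ite pvTr,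
    Nat.shiftRight_eq_div_pow, Nat.and_one_is_mod]
  norm_num [pvBitOne, pvBitZero, pvTr]
  simp only [show ("\u200c" : String).toList = ['\u200c'] from rfl,
    show ("\u200b" : String).toList = ['\u200b'] from rfl,
    show Int.toNat 7 = 7 from rfl, show Int.toNat 6 = 6 from rfl,
    show Int.toNat 5 = 5 from rfl, show Int.toNat 4 = 4 from rfl,
    show Int.toNat 3 = 3 from rfl, show Int.toNat 2 = 2 from rfl,
    show ¬(('0' : Char) = '1') from by decide, if_false]
  norm_num
  simp only [← apply_ite (fun c : Char => [c]), List.cons_append,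
    List.nil_append, List.cons.injEq]
  norm_num [Nat.div_div_eq_div_mul]
  have h7 : b % 256 / 128 % 2 = b / 128 % 2 := by omega
  have h6 : b % 256 / 64 % 2 = b / 64 % 2 := by omega
  have h5 : b % 256 / 32 % 2 = b / 32 % 2 := by omega
  have h4 : b % 256 / 16 % 2 = b / 16 % 2 := by omega
  have h3 : b % 256 / 8 % 2 = b / 8 % 2 := by omega
  have h2 : b % 256 / 4 % 2 = b / 4 % 2 := by omega
  have h1 : b % 256 / 2 % 2 = b / 2 % 2 := by omega
  simp [h7, h6, h5, h4, h3, h2, h1]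

theorem pvJoin_nil_flatten (parts : List (List Char)) :
    PySem.Chars.join [] parts = parts.flatten := by
  induction parts with
  | nil => rfl
  | cons h t ih => cases t with
    | nil => simp [PySem.Chars.join, List.intercalate]
    | cons h2 t2 =>
      rw [PySem.Chars.join_cons_cons] at *
      simp_all

theorem pvBody (cs : List Char) :
    (cs.flatMap pvChunkA').flatMap String.toList
      = cs.flatMap (fun c => (pvBin8 (c.toNat &&& 0xFF)).map pvTr) := by
  induction cs with
  | nil => rfl
  | cons c t ih =>
    simp only [List.flatMap_cons, List.flatMap_append, ih, pvChunkA']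
    rw [pvPerChar]

theorem encode_key_py_eq_alt (key : String) :
    encode_key_py key = encode_key_py_alt key := by
  unfold encode_key_py encode_key_py_alt
  have hfold : key.toList.foldl (fun bits char =>
      (PySem.List.pyRange 7 (-1) (-1)).foldl (fun bits bit_pos =>
        if (char.toNat >>> bit_pos.toNat) &&& 1 = 1 then bits ++ [pvBitOne]
        else bits ++ [pvBitZero]) bits) ([] : List String)
      = key.toList.flatMap pvChunkA' := by
    rw [PySem.List.foldl_congr_mem (g := fun bits char => bits ++ pvChunkA' char)
      (h := by intro acc c _; exact pvChunkA_spec c.toNat acc)]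
    exact PySem.List.foldl_append_eq_flatMap _ _ _
  simp only [hfold]
  congr 1
  congr 1
  apply String.toList_inj.mp
  rw [PySem.Str.toList_join, PySem.Str.toList_join,
    show ("" : String).toList = ([] : List Char) from rfl]
  rw [pvJoin_nil_flatten, pvJoin_nil_flatten, ← List.flatMap_def, ← List.flatMap_def]
  rw [pvBody key.toList]
  rw [List.flatMap_map]
  simp

-- ===== VERDICT (by name: the statement is the Claim_ definition above) =====
theorem encode_key_py_spec : Claim_equal_encode_key_py := by
  intro key _
  exact encode_key_py_eq_alt key
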